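-- pv_equiv track=rewrite | github.com/ashifsekh/sre-incident-agent | env.py | _infer_action_label
-- ===== SOURCE A (Python) =====
-- def _infer_action_label(correct_action: str) -> str:
--     text = correct_action.lower()
--
--     if any(token in text for token in ["rollback", "revert"]):
--         return "rollback"
--     if any(token in text for token in ["db", "database", "replica", "iops", "query"]):
--         return "scale_db"
--     if any(token in text for token in ["restart", "reschedule", "drain", "reboot"]):
--         return "restart_service"
--     if any(token in text for token in ["monitor", "observe", "watch"]):
--         return "monitor"
--     if any(token in text for token in ["investigate", "validate", "profile", "debug"]):
--         return "investigate"
--     if any(token in text for token in ["incident commander", "on-call", "escalate", "coordinate"]):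
--         return "escalate"
--
--     return "escalate"
-- ===== SOURCE B (Python) =====
-- _TOKEN_TABLE = [
--     ("rollback", "rollback"),
--     ("revert", "rollback"),
--     ("db", "scale_db"),
--     ("database", "scale_db"),
--     ("replica", "scale_db"),
--     ("iops", "scale_db"),
--     ("query", "scale_db"),
--     ("restart", "restart_service"),
--     ("reschedule", "restart_service"),
--     ("drain", "restart_service"),
--     ("reboot", "restart_service"),
--     ("monitor", "monitor"),
--     ("observe", "monitor"),
--     ("watch", "monitor"),
--     ("investigate", "investigate"),
--     ("validate", "investigate"),
--     ("profile", "investigate"),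
--     ("debug", "investigate"),
--     ("incident commander", "escalate"),
--     ("on-call", "escalate"),
--     ("escalate", "escalate"),
--     ("coordinate", "escalate"),
-- ]
--
-- def _infer_action_label(correct_action: str) -> str:
--     text = correct_action.lower()
--     result = "escalate"
--     for tok, label in reversed(_TOKEN_TABLE):
--         if tok in text:
--             result = label
--     return result
-- ===== Notes on version B (the rewrite author's own statement) =====
-- stated objective: alternative
-- what changed: Replaced the six ordered short-circuit if-branches of any() tests by a single reverse-order pass over a flat token->label table with a last-write-wins accumulator (no grouping, no any(), no early return); scanning back-to-front makes the highest-priority matching token win.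
import Mathlib
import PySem

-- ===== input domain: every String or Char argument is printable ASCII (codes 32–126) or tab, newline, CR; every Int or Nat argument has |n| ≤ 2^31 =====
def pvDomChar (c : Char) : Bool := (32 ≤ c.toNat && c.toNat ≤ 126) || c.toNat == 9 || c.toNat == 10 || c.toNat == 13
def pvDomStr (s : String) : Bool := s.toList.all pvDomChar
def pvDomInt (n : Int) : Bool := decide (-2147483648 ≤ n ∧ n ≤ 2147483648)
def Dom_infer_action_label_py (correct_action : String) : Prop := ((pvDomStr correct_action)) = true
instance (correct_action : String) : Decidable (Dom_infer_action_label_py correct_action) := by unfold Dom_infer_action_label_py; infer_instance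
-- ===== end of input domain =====

-- B replaces the ordered short-circuit branches by one reverse pass over a flat token->label table with a last-write-wins accumulator (objective: alternative).

-- ===== PORT A =====
def infer_action_label_py (correct_action : String) : String :=
  let text := PySem.Str.lower correct_action
  if ["rollback", "revert"].any (fun token => PySem.Str.isIn token text) then "rollback"
  else if ["db", "database", "replica", "iops", "query"].any (fun token => PySem.Str.isIn token text) then "scale_db"
  else if ["restart", "reschedule", "drain", "reboot"].any (fun token => PySem.Str.isIn token text) then "restart_service"
  else if ["monitor", "observe", "watch"].any (fun token => PySem.Str.isIn token text) then "monitor"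
  else if ["investigate", "validate", "profile", "debug"].any (fun token => PySem.Str.isIn token text) then "investigate"
  else if ["incident commander", "on-call", "escalate", "coordinate"].any (fun token => PySem.Str.isIn token text) then "escalate"
  else "escalate"

-- ===== PORT B =====
def pvTokenTable : List (String × String) :=
  [("rollback", "rollback"), ("revert", "rollback"),
   ("db", "scale_db"), ("database", "scale_db"), ("replica", "scale_db"), ("iops", "scale_db"), ("query", "scale_db"),
   ("restart", "restart_service"), ("reschedule", "restart_service"), ("drain", "restart_service"), ("reboot", "restart_service"),
   ("monitor", "monitor"), ("observe", "monitor"), ("watch", "monitor"),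
   ("investigate", "investigate"), ("validate", "investigate"), ("profile", "investigate"), ("debug", "investigate"),
   ("incident commander", "escalate"), ("on-call", "escalate"), ("escalate", "escalate"), ("coordinate", "escalate")]

def infer_action_label_py_alt (correct_action : String) : String :=
  let text := PySem.Str.lower correct_action
  pvTokenTable.reverse.foldl
    (fun result p => if PySem.Str.isIn p.1 text then p.2 else result) "escalate"

-- ===== PRECONDITION & SPEC =====
def Spec_infer_action_label_py (correct_action : String) (out : String) : Prop := out = infer_action_label_py_alt correct_action
instance (correct_action : String) (out : String) : Decidable (Spec_infer_action_label_py correct_action out) := by unfold Spec_infer_action_label_py; infer_instance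

-- ===== CLAIM (what is proved, stated in full; the proofs are below) =====
def Claim_equal_infer_action_label_py : Prop := ∀ (correct_action : String), Dom_infer_action_label_py correct_action → Spec_infer_action_label_py correct_action (infer_action_label_py correct_action)

-- ===== LEMMAS AND PROOFS =====
-- Splitting an OR-ed condition into two nested first-match ifs.
theorem pv_if_or {α : Type} (a b : Bool) (x y : α) :
    (if (a || b) = true then x else y) = if a = true then x else if b = true then x else y := by
  cases a <;> simp

-- ===== VERDICT (by name: the statement is the Claim_ definition above) =====
set_option maxHeartbeats 1000000 in
theorem infer_action_label_py_spec : Claim_equal_infer_action_label_py := by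
  intro s _
  unfold Spec_infer_action_label_py infer_action_label_py infer_action_label_py_alt pvTokenTable
  simp only [List.any_cons, List.any_nil, Bool.or_false, List.reverse_cons, List.reverse_nil,
    List.nil_append, List.cons_append, List.foldl_cons, List.foldl_nil, pv_if_or]
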